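-- pv_equiv track=rewrite | github.com/kononenkoVlad/LAB4 | functions.py | get_components_of_strong_connectivity
-- ===== SOURCE A (Python) =====
-- def get_components_of_strong_connectivity(matrix_of_strong_connectivity):
--     components = []
--     length = len(matrix_of_strong_connectivity)
--     for row in range(length):
--         same_component_number = False
--         for k in range(len(components)):
--             same_components = True
--             component = components[k]["component"]
--             for cell in range(len(component)):
--                 if component[cell] != matrix_of_strong_connectivity[row][cell]:
--                     same_components = False
--                     break
--
--             if same_components:
--                 same_component_number = k
--                 break
--         if type(same_component_number) is not bool:
--             components[same_component_number]["rows"].append(row)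
--         else:
--             components.append({
--                 "component": matrix_of_strong_connectivity[row],
--                 "rows": [row],
--             })
--
--     result = []
--     for component in components:
--         result.append(component["rows"])
--     return result
-- ===== SOURCE B (Python) =====
-- # B: two staged passes instead of A's single pass that grows per-component index
-- # lists while it scans: first collect the distinct row patterns in order of first
-- # appearance, then gather each pattern's row indices with a separate scan.
-- def get_components_of_strong_connectivity(matrix_of_strong_connectivity):
--     patterns = []
--     for row in matrix_of_strong_connectivity:
--         if row not in patterns:
--             patterns.append(row)
--     return [[i for i, row in enumerate(matrix_of_strong_connectivity) if row == pattern]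
--             for pattern in patterns]
-- ===== Notes on version B (the rewrite author's own statement) =====
-- stated objective: simpler
-- what changed: A builds per-component index lists incrementally in one pass over an accumulator of {component,rows} dicts; B uses two staged passes: dedup the row patterns in first-appearance order, then a separate gathering scan per pattern collects its indices.
-- outside the precondition, e.g. on get_components_of_strong_connectivity([[1, 2], [1, 2, 3]]): A returns [[0, 1]], B returns [[0], [1]]
import Mathlib
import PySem

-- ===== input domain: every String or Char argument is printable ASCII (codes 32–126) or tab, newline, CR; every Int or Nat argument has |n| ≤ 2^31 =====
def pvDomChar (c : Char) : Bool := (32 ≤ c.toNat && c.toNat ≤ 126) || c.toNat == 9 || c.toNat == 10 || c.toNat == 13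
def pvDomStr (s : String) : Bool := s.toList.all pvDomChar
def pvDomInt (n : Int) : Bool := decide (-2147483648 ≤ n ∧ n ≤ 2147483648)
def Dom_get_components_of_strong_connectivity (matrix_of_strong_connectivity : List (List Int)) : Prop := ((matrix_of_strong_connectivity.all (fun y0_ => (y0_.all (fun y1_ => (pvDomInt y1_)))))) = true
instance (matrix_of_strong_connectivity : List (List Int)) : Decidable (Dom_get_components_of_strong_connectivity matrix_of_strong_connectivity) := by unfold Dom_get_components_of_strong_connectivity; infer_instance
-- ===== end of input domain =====

-- B replaces A's single accumulating pass with two staged passes: dedup the row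
-- patterns in first-appearance order, then gather each pattern's indices by a
-- separate scan (objective: simpler decomposition, same cost).

-- ===== PORT A =====
-- inner 'for cell in range(len(component))' loop; Python raises IndexError when the
-- row is shorter than the component (outside Pre_), modelled here as a mismatch
def pvCellLoop : List Int → List Int → Bool
  | [], _ => true
  | _ :: _, [] => false
  | c :: cs, v :: vs => if c ≠ v then false else pvCellLoop cs vs

-- 'for k in range(len(components))' search loop, returning the first matching k
def pvFindComp : List (List Int × List Int) → List Int → Nat → Option Nat
  | [], _, _ => none
  | p :: rest, rowvals, k =>
      if pvCellLoop p.1 rowvals then some k else pvFindComp rest rowvals (k + 1)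

-- 'components[same_component_number]["rows"].append(row)'
def pvAppendRow : List (List Int × List Int) → Nat → Int → List (List Int × List Int)
  | [], _, _ => []
  | p :: rest, 0, row => (p.1, p.2 ++ [row]) :: rest
  | p :: rest, k + 1, row => p :: pvAppendRow rest k row

-- outer 'for row in range(length)' loop over the rows, carrying the row index
def pvLoopA : List (List Int) → Int → List (List Int × List Int) → List (List Int × List Int)
  | [], _, comps => comps
  | r :: rs, i, comps =>
      pvLoopA rs (i + 1)
        (match pvFindComp comps r 0 with
         | some k => pvAppendRow comps k i
         | none => comps ++ [(r, [i])])

def get_components_of_strong_connectivity (matrix_of_strong_connectivity : List (List Int)) : List (List Int) :=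
  (pvLoopA matrix_of_strong_connectivity 0 []).map (·.2)

-- ===== PORT B =====
-- first pass: 'if row not in patterns: patterns.append(row)'
def pvRepsLoop : List (List Int) → List (List Int) → List (List Int)
  | [], acc => acc
  | r :: rs, acc => pvRepsLoop rs (if acc.contains r then acc else acc ++ [r])

-- gathering pass: '[i for i, row in enumerate(...) if row == pattern]'
def pvIdxLoop (pattern : List Int) : List (List Int) → Int → List Int
  | [], _ => []
  | r :: rs, i => if r == pattern then i :: pvIdxLoop pattern rs (i + 1) else pvIdxLoop pattern rs (i + 1)

def get_components_of_strong_connectivity_alt (matrix_of_strong_connectivity : List (List Int)) : List (List Int) :=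
  (pvRepsLoop matrix_of_strong_connectivity []).map
    (fun pattern => pvIdxLoop pattern matrix_of_strong_connectivity 0)

-- ===== PRECONDITION & SPEC =====
-- Pre_ excludes matrices in which one row is a proper prefix of another: there A compares
-- only the stored component's length, so it groups unequal rows together (or raises
-- IndexError), while B groups by the whole row; every genuine (equal-row-length)
-- connectivity matrix satisfies Pre_.
def Pre_get_components_of_strong_connectivity (matrix_of_strong_connectivity : List (List Int)) : Prop :=
  ∀ r1 ∈ matrix_of_strong_connectivity, ∀ r2 ∈ matrix_of_strong_connectivity, r1 <+: r2 → r1 = r2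

instance (matrix_of_strong_connectivity : List (List Int)) : Decidable (Pre_get_components_of_strong_connectivity matrix_of_strong_connectivity) := by
  unfold Pre_get_components_of_strong_connectivity; infer_instance

def pvWitness_get_components_of_strong_connectivity : List (List Int) := [[1, 0], [0, 1], [1, 0]]

def Spec_get_components_of_strong_connectivity (matrix_of_strong_connectivity : List (List Int)) (out : List (List Int)) : Prop := out = get_components_of_strong_connectivity_alt matrix_of_strong_connectivity
instance (matrix_of_strong_connectivity : List (List Int)) (out : List (List Int)) : Decidable (Spec_get_components_of_strong_connectivity matrix_of_strong_connectivity out) := by unfold Spec_get_components_of_strong_connectivity; infer_instance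

-- ===== CLAIM (what is proved, stated in full; the proofs are below) =====
def Claim_equal_get_components_of_strong_connectivity : Prop := ∀ (matrix_of_strong_connectivity : List (List Int)), Dom_get_components_of_strong_connectivity matrix_of_strong_connectivity → Pre_get_components_of_strong_connectivity matrix_of_strong_connectivity → Spec_get_components_of_strong_connectivity matrix_of_strong_connectivity (get_components_of_strong_connectivity matrix_of_strong_connectivity)

-- ===== LEMMAS AND PROOFS =====

-- A's inner cell loop is exactly the prefix test on the stored component's length.
theorem pvCellLoop_eq_isPrefixOf : ∀ (c r : List Int), pvCellLoop c r = List.isPrefixOf c r := by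
  intro c
  induction c with
  | nil => intro r; cases r <;> rfl
  | cons a cs ih =>
      intro r
      cases r with
      | nil => rfl
      | cons b rs =>
          by_cases hab : a = b
          · simp [pvCellLoop, List.isPrefixOf, hab, ih rs]
          · simp [pvCellLoop, List.isPrefixOf, hab]

-- When no proper-prefix relation can hold, the prefix test is full equality.
theorem pvCellLoop_eq_beq (c r : List Int) (h : c <+: r → c = r) : pvCellLoop c r = (c == r) := by
  rw [pvCellLoop_eq_isPrefixOf]
  by_cases hcr : c = r
  · subst hcr; simp
  · have hnp : ¬ c <+: r := fun hp => hcr (h hp)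
    simp only [← List.isPrefixOf_iff_prefix] at hnp
    simp [hnp, hcr]

theorem pvFindComp_shift (comps : List (List Int × List Int)) (r : List Int) (n : Nat) :
    pvFindComp comps r n = (pvFindComp comps r 0).map (· + n) := by
  induction comps generalizing n with
  | nil => simp [pvFindComp]
  | cons p rest ih =>
      by_cases h : pvCellLoop p.1 r
      · simp [pvFindComp, h]
      · simp only [pvFindComp, h, ih (n + 1), ih 1]
        cases pvFindComp rest r 0 <;> simp <;> omega

-- the dedup accumulator step, named for the proofs
def pvStepReps (reps : List (List Int)) (r : List Int) : List (List Int) :=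
  if reps.contains r then reps else reps ++ [r]

theorem pvRepsLoop_append (xs ys acc : List (List Int)) :
    pvRepsLoop (xs ++ ys) acc = pvRepsLoop ys (pvRepsLoop xs acc) := by
  induction xs generalizing acc with
  | nil => rfl
  | cons x xs ih => simp [pvRepsLoop, ih]

theorem mem_pvRepsLoop (x : List Int) :
    ∀ (xs acc : List (List Int)), x ∈ pvRepsLoop xs acc ↔ x ∈ acc ∨ x ∈ xs := by
  intro xs
  induction xs with
  | nil => simp [pvRepsLoop]
  | cons r rs ih =>
      intro acc
      by_cases hc : acc.contains r = true
      · have hr : r ∈ acc := by simpa using hc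
        rw [pvRepsLoop, if_pos hc, ih acc]
        simp only [List.mem_cons]
        constructor
        · tauto
        · rintro (h | h | h)
          exacts [Or.inl h, Or.inl (h ▸ hr), Or.inr h]
      · rw [pvRepsLoop, if_neg hc, ih (acc ++ [r])]
        simp only [List.mem_append, List.mem_singleton, List.mem_cons]
        tauto

theorem nodup_pvRepsLoop :
    ∀ (xs acc : List (List Int)), acc.Nodup → (pvRepsLoop xs acc).Nodup := by
  intro xs
  induction xs with
  | nil => intro acc h; exact h
  | cons r rs ih =>
      intro acc h
      by_cases hc : acc.contains r = true
      · rw [pvRepsLoop, if_pos hc]; exact ih acc h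
      · have hr : r ∉ acc := by simpa using hc
        have hnd : (acc ++ [r]).Nodup := by
          rw [List.nodup_append]
          refine ⟨h, List.nodup_singleton r, ?_⟩
          intro a ha b hb he
          exact hr (((List.eq_of_mem_singleton hb) ▸ he) ▸ ha)
        rw [pvRepsLoop, if_neg hc]; exact ih (acc ++ [r]) hnd

theorem pvIdxLoop_append (pattern : List Int) (xs ys : List (List Int)) :
    ∀ i : Int, pvIdxLoop pattern (xs ++ ys) i =
      pvIdxLoop pattern xs i ++ pvIdxLoop pattern ys (i + xs.length) := by
  induction xs with
  | nil => intro i; simp [pvIdxLoop]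
  | cons x xs ih =>
      intro i
      have hadd : i + 1 + (xs.length : Int) = i + ((xs.length : Int) + 1) := by ring
      simp only [List.cons_append, pvIdxLoop, ih (i + 1), List.length_cons]
      split_ifs <;> push_cast <;> simp [hadd]

theorem pvIdxLoop_nil_of_not_mem (pattern : List Int) :
    ∀ (xs : List (List Int)) (i : Int), pattern ∉ xs → pvIdxLoop pattern xs i = [] := by
  intro xs
  induction xs with
  | nil => intro i _; rfl
  | cons x xs ih =>
      intro i h
      have hx : (x == pattern) = false := by
        simp only [List.mem_cons, not_or] at h
        simp [Ne.symm h.1]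
      simp only [pvIdxLoop, hx, if_false]
      exact ih (i + 1) (by simp_all)

-- A's find-and-append (or extend) step acts on a 'reps.map' state exactly like
-- B's dedup step paired with extending each pattern's index list.
theorem stepAB (r : List Int) (i : Int) (g : List Int → List Int) :
    ∀ reps : List (List Int),
      (∀ q ∈ reps, pvCellLoop q r = (q == r)) → reps.Nodup → (r ∉ reps → g r = []) →
      (match pvFindComp (reps.map (fun q => (q, g q))) r 0 with
       | some k => pvAppendRow (reps.map (fun q => (q, g q))) k i
       | none => reps.map (fun q => (q, g q)) ++ [(r, [i])])
      = (pvStepReps reps r).map (fun q => (q, g q ++ if q == r then [i] else [])) := by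
  intro reps
  induction reps with
  | nil =>
      intro _ _ hg0
      simp [pvFindComp, pvStepReps, hg0]
  | cons q qs ih =>
      intro hcell hnd hg0
      have hq := hcell q (by simp)
      by_cases hqr : q = r
      · have hcl : pvCellLoop q r = true := by rw [hq]; simp [hqr]
        have hrq : r ∉ qs := fun hm => (List.nodup_cons.1 hnd).1 (hqr ▸ hm)
        simp only [List.map_cons, pvFindComp, hcl, if_true]
        rw [pvStepReps, if_pos (by simp [hqr] : ((q :: qs).contains r) = true)]
        simp only [pvAppendRow, List.map_cons, hqr, BEq.rfl, if_true]
        congr 1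
        refine (List.map_congr_left ?_).symm
        intro x hx
        have hxr : x ≠ r := fun he => hrq (he ▸ hx)
        simp [hxr]
      · have hcl : pvCellLoop q r = false := by
          rw [hq]; simp [hqr]
        have hqsnd := (List.nodup_cons.1 hnd).2
        have hg0' : r ∉ qs → g r = [] := fun h => hg0 (by simp [Ne.symm hqr, h])
        have hcell' : ∀ x ∈ qs, pvCellLoop x r = (x == r) :=
          fun x hx => hcell x (List.mem_cons_of_mem _ hx)
        have ihr := ih hcell' hqsnd hg0'
        have hsplit :
            (match pvFindComp ((q :: qs).map (fun q => (q, g q))) r 0 with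
             | some k => pvAppendRow ((q :: qs).map (fun q => (q, g q))) k i
             | none => (q :: qs).map (fun q => (q, g q)) ++ [(r, [i])])
            = (q, g q) ::
              (match pvFindComp (qs.map (fun q => (q, g q))) r 0 with
               | some k => pvAppendRow (qs.map (fun q => (q, g q))) k i
               | none => qs.map (fun q => (q, g q)) ++ [(r, [i])]) := by
          simp only [List.map_cons, pvFindComp, hcl, if_false,
            pvFindComp_shift (qs.map (fun q => (q, g q))) r 1]
          cases pvFindComp (qs.map (fun q => (q, g q))) r 0 with
          | none => simp
          | some k => simp [pvAppendRow]
        rw [hsplit, ihr]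
        by_cases hmem : r ∈ qs
        · simp [pvStepReps, hmem, hqr]
        · have hgr : g r = [] := hg0 (by simp [hmem, Ne.symm hqr])
          simp [pvStepReps, hmem, hqr, Ne.symm hqr, hgr]

-- Main loop invariant: after processing 'pre', A's components list is exactly the
-- deduped patterns of 'pre' paired with their index lists in 'pre'.
theorem loopA_char (m : List (List Int))
    (hpre : ∀ r1 ∈ m, ∀ r2 ∈ m, r1 <+: r2 → r1 = r2) :
    ∀ (rs pre : List (List Int)), pre ++ rs = m →
      pvLoopA rs (pre.length : Int)
        ((pvRepsLoop pre []).map (fun q => (q, pvIdxLoop q pre 0)))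
      = (pvRepsLoop m []).map (fun q => (q, pvIdxLoop q m 0)) := by
  intro rs
  induction rs with
  | nil => intro pre heq; simp at heq; subst heq; rfl
  | cons r rs ih =>
      intro pre heq
      have hrm : r ∈ m := by rw [← heq]; simp
      have hsub : ∀ x ∈ pvRepsLoop pre [], x ∈ m := by
        intro x hx
        have : x ∈ pre := by simpa using (mem_pvRepsLoop x pre []).1 hx
        rw [← heq]; exact List.mem_append_left _ this
      have hcell : ∀ q ∈ pvRepsLoop pre [], pvCellLoop q r = (q == r) :=
        fun q hq => pvCellLoop_eq_beq q r (fun hp => hpre q (hsub q hq) r hrm hp)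
      have hnd : (pvRepsLoop pre []).Nodup := nodup_pvRepsLoop pre [] (by simp)
      have hg0 : r ∉ pvRepsLoop pre [] → pvIdxLoop r pre 0 = [] := by
        intro h
        exact pvIdxLoop_nil_of_not_mem r pre 0 (fun hm => h ((mem_pvRepsLoop r pre []).2 (Or.inr hm)))
      have hstep := stepAB r (pre.length : Int) (fun q => pvIdxLoop q pre 0)
        (pvRepsLoop pre []) hcell hnd hg0
      simp only [pvLoopA]
      rw [hstep]
      have hreps : pvStepReps (pvRepsLoop pre []) r = pvRepsLoop (pre ++ [r]) [] := by
        rw [pvRepsLoop_append]; rfl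
      have hmap :
          (pvStepReps (pvRepsLoop pre []) r).map
            (fun q => (q, pvIdxLoop q pre 0 ++ if q == r then [(pre.length : Int)] else []))
          = (pvRepsLoop (pre ++ [r]) []).map (fun q => (q, pvIdxLoop q (pre ++ [r]) 0)) := by
        rw [hreps]
        refine List.map_congr_left ?_
        intro q _
        rw [pvIdxLoop_append q pre [r] 0]
        congr 1
        by_cases h : r = q
        · simp [pvIdxLoop, h]
        · simp [pvIdxLoop, h, Ne.symm h]
      rw [hmap]
      have hlen : (pre.length : Int) + 1 = ((pre ++ [r]).length : Int) := by
        simp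
      rw [hlen]
      exact ih (pre ++ [r]) (by simpa using heq)

-- ===== VERDICT (by name: the statement is the Claim_ definition above) =====
theorem get_components_of_strong_connectivity_spec : Claim_equal_get_components_of_strong_connectivity := by
  intro m _ hpre
  unfold Spec_get_components_of_strong_connectivity
  unfold get_components_of_strong_connectivity get_components_of_strong_connectivity_alt
  have h := loopA_char m hpre m [] rfl
  simp only [pvRepsLoop, List.map_nil, List.length_nil, Nat.cast_zero] at h
  rw [h, List.map_map]
  rfl
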